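-- pv_equiv track=rewrite | github.com/lpham2309/computational-biology | align.py | setTraceBackMatrix
-- ===== SOURCE A (Python) =====
-- def createEmptyMatrix(rows, cols, default_value):
--     '''
--     Initiate an empty matrix with rows and columns equivalent
--     to both input sequence length
--     '''
--     alignmentMatrix = []
--     for i in range(len(rows)+1):
--         subMatrix = []
--         for j in range(len(cols)+1):
--             subMatrix.append(default_value)
--         alignmentMatrix.append(subMatrix)
--     return alignmentMatrix
--
-- def setTraceBackMatrix(rows, columns):
-- 	alignmentMatrix = createEmptyMatrix(rows, columns, '0')
--
-- 	for j in range(1,len(columns)+1):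
-- 		alignmentMatrix[0][j] = 'LEFT'
-- 	for i in range(1,len(rows)+1):
-- 		alignmentMatrix[i][0] = 'TOP'
-- 	alignmentMatrix[0][0] = 'DONE'
-- 	return alignmentMatrix
-- ===== SOURCE B (Python) =====
-- def setTraceBackMatrix(rows, columns):
--     matrix = [['DONE'] + ['LEFT'] * len(columns)]
--     for _ in range(len(rows)):
--         matrix.append(['TOP'] + ['0'] * len(columns))
--     return matrix
-- ===== Notes on version B (the rewrite author's own statement) =====
-- stated objective: simpler
-- what changed: B builds each row directly from templates (['DONE']+['LEFT']*c first, then r copies of ['TOP']+['0']*c) in one pass, instead of allocating a (r+1)x(c+1) matrix of '0' and patching its first row, first column and corner with three separate index-assignment loops.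
import Mathlib
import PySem

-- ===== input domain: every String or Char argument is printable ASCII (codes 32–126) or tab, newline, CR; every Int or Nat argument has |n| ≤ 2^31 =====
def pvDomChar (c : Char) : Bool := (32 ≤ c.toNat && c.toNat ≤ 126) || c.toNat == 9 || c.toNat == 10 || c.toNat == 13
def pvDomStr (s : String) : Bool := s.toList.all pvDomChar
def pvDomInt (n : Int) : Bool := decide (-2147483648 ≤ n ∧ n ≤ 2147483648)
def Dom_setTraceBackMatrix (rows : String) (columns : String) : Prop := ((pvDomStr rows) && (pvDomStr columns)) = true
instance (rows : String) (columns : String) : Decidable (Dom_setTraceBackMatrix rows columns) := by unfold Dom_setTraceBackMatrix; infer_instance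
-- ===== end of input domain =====

-- B replaces A's allocate-then-patch (fill with '0', then overwrite first row, first
-- column and corner in three loops) by building each row directly from templates in one
-- pass; objective: simpler.

-- ===== PORT A =====
-- port of createEmptyMatrix: two nested append loops filling with the default value
def createEmptyMatrixPort (rows : String) (cols : String) (defaultValue : String) : List (List String) :=
  (List.range (rows.toList.length + 1)).foldl
    (fun alignmentMatrix _ =>
      alignmentMatrix ++ [(List.range (cols.toList.length + 1)).foldl
        (fun subMatrix _ => subMatrix ++ [defaultValue]) []])
    []

def setTraceBackMatrix (rows : String) (columns : String) : List (List String) :=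
  -- m0 = createEmptyMatrix(rows, columns, '0'); then the 'LEFT' loop over j, the 'TOP'
  -- loop over i, and finally alignmentMatrix[0][0] = 'DONE' (each [..][..]= is a modify/set)
  (((PySem.List.pyRange 1 ((rows.toList.length : Int) + 1) 1).foldl
      (fun m i => m.modify i.toNat (fun row => row.set 0 "TOP"))
      ((PySem.List.pyRange 1 ((columns.toList.length : Int) + 1) 1).foldl
        (fun m j => m.modify 0 (fun row => row.set j.toNat "LEFT"))
        (createEmptyMatrixPort rows columns "0"))).modify 0
    (fun row => row.set 0 "DONE"))

-- ===== PORT B =====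
def setTraceBackMatrix_alt (rows : String) (columns : String) : List (List String) :=
  let first := ["DONE"] ++ List.replicate columns.toList.length "LEFT"
  (List.range rows.toList.length).foldl
    (fun matrix _ => matrix ++ [["TOP"] ++ List.replicate columns.toList.length "0"])
    [first]

-- ===== PRECONDITION & SPEC =====
def Spec_setTraceBackMatrix (rows : String) (columns : String) (out : List (List String)) : Prop := out = setTraceBackMatrix_alt rows columns
instance (rows : String) (columns : String) (out : List (List String)) : Decidable (Spec_setTraceBackMatrix rows columns out) := by unfold Spec_setTraceBackMatrix; infer_instance

-- ===== CLAIM (what is proved, stated in full; the proofs are below) =====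
def Claim_equal_setTraceBackMatrix : Prop := ∀ (rows : String) (columns : String), Dom_setTraceBackMatrix rows columns → Spec_setTraceBackMatrix rows columns (setTraceBackMatrix rows columns)

-- ===== LEMMAS AND PROOFS =====

-- A fold of index-`modify` over the positions after a prefix rewrites exactly the suffix.
theorem foldl_modify_range {α : Type} (f : α → α) :
    ∀ (l pre : List α),
      (List.range l.length).foldl (fun m k => m.modify (pre.length + k) f) (pre ++ l)
        = pre ++ l.map f := by
  intro l
  induction l with
  | nil => intro pre; simp
  | cons a t ih =>
    intro pre
    have hmod : ∀ (xs : List α) (b : α) (ys : List α),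
        (xs ++ b :: ys).modify xs.length f = xs ++ f b :: ys := by
      intro xs
      induction xs with
      | nil => intro b ys; simp
      | cons x xs ihx => intro b ys; simpa using ihx b ys
    rw [List.length_cons, List.range_succ_eq_map]
    simp only [List.foldl_cons, List.foldl_map, Nat.add_zero]
    rw [hmod pre a t]
    have hfg : (fun (m : List α) (k : Nat) => m.modify (pre.length + Nat.succ k) f)
        = (fun (m : List α) (k : Nat) => m.modify ((pre ++ [f a]).length + k) f) := by
      funext m k; congr 1; simp; omega
    rw [hfg]
    have h3 := ih (pre ++ [f a])
    rw [List.append_assoc] at h3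
    simp only [List.singleton_append] at h3
    rw [h3]
    simp

-- A fold that only modifies index 0 rewrites only the head.
theorem foldl_modify_zero {α β : Type} (g : β → α → α) :
    ∀ (l : List β) (a : α) (t : List α),
      l.foldl (fun m j => m.modify 0 (g j)) (a :: t) = (l.foldl (fun x j => g j x) a) :: t := by
  intro l
  induction l with
  | nil => intro a t; simp
  | cons b l ih => intro a t; simpa using ih (g b a) t

-- range(1, n+1) as a mapped Nat range
theorem pyRange_one_succ (n : Nat) :
    PySem.List.pyRange 1 ((n : Int) + 1) 1 = (List.range n).map (fun k : Nat => 1 + (k : Int)) := by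
  have h := PySem.List.pyRange_one 1 ((n : Int) + 1)
  have h2 : ((n : Int) + 1 - 1).toNat = n := by omega
  rw [h, h2]

theorem createEmptyMatrixPort_eq (rows cols : String) (v : String) :
    createEmptyMatrixPort rows cols v
      = List.replicate (rows.toList.length + 1) (List.replicate (cols.toList.length + 1) v) := by
  unfold createEmptyMatrixPort
  simp only [PySem.List.foldl_append_singleton_eq_map]
  simp [List.map_const']

-- the first patch loop: sets positions 1..c of the first row to 'LEFT'
theorem left_row_eq (c : Nat) :
    (PySem.List.pyRange 1 ((c : Int) + 1) 1).foldl
        (fun (row : List String) j => row.set j.toNat "LEFT") (List.replicate (c + 1) "0")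
      = "0" :: List.replicate c "LEFT" := by
  rw [pyRange_one_succ, List.foldl_map]
  have : (fun (row : List String) (k : Nat) => row.set (1 + (k : Int)).toNat "LEFT")
       = (fun (row : List String) (k : Nat) => row.modify (["0"].length + k) (fun _ => "LEFT")) := by
    funext row k
    have h : ((1 : Int) + (k : Int)).toNat = 1 + k := by omega
    rw [h, List.set_eq_modify]
    simp
  rw [this]
  have h0 : List.replicate (c + 1) "0" = ["0"] ++ List.replicate c "0" := by
    simp [List.replicate_succ]
  rw [h0]
  have := foldl_modify_range (α := String) (fun _ => "LEFT") (List.replicate c "0") ["0"]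
  simpa using this

theorem setTraceBackMatrix_eq (rows columns : String) :
    setTraceBackMatrix rows columns
      = ("DONE" :: List.replicate columns.toList.length "LEFT")
        :: List.replicate rows.toList.length ("TOP" :: List.replicate columns.toList.length "0") := by
  unfold setTraceBackMatrix
  set r := rows.toList.length
  set c := columns.toList.length
  rw [createEmptyMatrixPort_eq]
  have hm0 : List.replicate (r + 1) (List.replicate (c + 1) "0")
      = List.replicate (c + 1) "0" :: List.replicate r (List.replicate (c + 1) "0") := by
    simp [List.replicate_succ]
  rw [hm0, foldl_modify_zero, left_row_eq]
  -- second loop: modify rows 1..r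
  rw [pyRange_one_succ, List.foldl_map]
  have hfun : (fun (m : List (List String)) (k : Nat) =>
        m.modify (1 + (k : Int)).toNat (fun row => row.set 0 "TOP"))
      = (fun (m : List (List String)) (k : Nat) =>
        m.modify ([("0" : String) :: List.replicate c "LEFT"].length + k) (fun row => row.set 0 "TOP")) := by
    funext m k
    have h : ((1 : Int) + (k : Int)).toNat = 1 + k := by omega
    rw [h]; simp
  rw [hfun]
  have hM := foldl_modify_range (fun row : List String => row.set 0 "TOP")
    (List.replicate r (List.replicate (c + 1) "0")) ["0" :: List.replicate c "LEFT"]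
  simp only [List.length_replicate] at hM
  rw [show ((("0" : String) :: List.replicate c "LEFT") :: List.replicate r (List.replicate (c + 1) "0"))
        = [("0" : String) :: List.replicate c "LEFT"] ++ List.replicate r (List.replicate (c + 1) "0") from rfl,
      hM]
  simp [List.replicate_succ, List.modify]

theorem setTraceBackMatrix_alt_eq (rows columns : String) :
    setTraceBackMatrix_alt rows columns
      = ("DONE" :: List.replicate columns.toList.length "LEFT")
        :: List.replicate rows.toList.length ("TOP" :: List.replicate columns.toList.length "0") := by
  unfold setTraceBackMatrix_alt
  rw [show (fun (matrix : List (List String)) (_ : Nat) =>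
        matrix ++ [["TOP"] ++ List.replicate columns.toList.length "0"])
      = (fun (acc : List (List String)) (x : Nat) =>
        acc ++ [(fun _ => ["TOP"] ++ List.replicate columns.toList.length "0") x]) from rfl,
      PySem.List.foldl_append_singleton_eq_map]
  simp [List.map_const']

-- ===== VERDICT (by name: the statement is the Claim_ definition above) =====
theorem setTraceBackMatrix_spec : Claim_equal_setTraceBackMatrix := by
  intro rows columns _
  unfold Spec_setTraceBackMatrix
  rw [setTraceBackMatrix_eq, setTraceBackMatrix_alt_eq]
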